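-- pv_equiv track=rewrite | github.com/baedonguri/JungleAlgorithm | 알고리즘스터디/week02/신고결과받기.py | solution
-- ===== SOURCE A (Python) =====
-- from collections import defaultdict
--
-- def solution(id_list, report, k):
--
--     report = list(set(report))
--     r_dic,u_dic = defaultdict(list), defaultdict(list)
--     answer = []
--
--     # 1.1 각 유저별로 신고 당한 횟수를 기록
--     for rep in report:
--         x,y = rep.split(" ")
--
--         if y not in r_dic:
--             r_dic[y] = 1
--         else:
--             r_dic[y] += 1
--         u_dic[x] += [y] # 1.2 유저별 신고한 대상을 저장
--
--     # 2.1 전체 유저 리스트 순회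
--     for u_id in id_list:
--         cnt = 0
--         # 2.2 해당 유저가 신고한 녀석들을 확인
--         for v in u_dic[u_id]:
--             # 2.3 정지되었다면 + 1
--             if r_dic[v] >= k:
--                 cnt += 1
--         # 최종적으로 날릴 메일의 갯수
--         answer.append(cnt)
--
--     return answer
-- ===== SOURCE B (Python) =====
-- def solution(id_list, report, k):
--     # Sort-and-sweep instead of hash maps: order the deduplicated reports by
--     # reportee, sweep the contiguous groups once (a group of size >= k is a
--     # banned reportee), collect the reporters of banned groups, and read each
--     # user's mail count off that list.
--     pairs = []
--     for r in set(report):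
--         x, y = r.split(" ")
--         pairs.append((y, x))
--     pairs.sort()
--     mails = []
--     rest = pairs
--     while rest:
--         y = rest[0][0]
--         j = 0
--         while j < len(rest) and rest[j][0] == y:
--             j += 1
--         if j >= k:
--             mails.extend(x for _, x in rest[:j])
--         rest = rest[j:]
--     return [mails.count(u) for u in id_list]
-- ===== Notes on version B (the rewrite author's own statement) =====
-- stated objective: alternative
-- what changed: B replaces A's two hash maps (per-reportee ban counter plus per-reporter adjacency lists scanned by a nested loop) with sort-and-sweep: it sorts the deduplicated reports by reportee, sweeps the contiguous groups once emitting the reporters of groups of size >= k, and reads each user's answer off that list by counting.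
-- outside the precondition, e.g. on solution(['a'], ['ab'], 1): A raises ValueError, B raises ValueError; on solution(['a'], ['a  b'], 1): A raises ValueError, B raises ValueError
import Mathlib
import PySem

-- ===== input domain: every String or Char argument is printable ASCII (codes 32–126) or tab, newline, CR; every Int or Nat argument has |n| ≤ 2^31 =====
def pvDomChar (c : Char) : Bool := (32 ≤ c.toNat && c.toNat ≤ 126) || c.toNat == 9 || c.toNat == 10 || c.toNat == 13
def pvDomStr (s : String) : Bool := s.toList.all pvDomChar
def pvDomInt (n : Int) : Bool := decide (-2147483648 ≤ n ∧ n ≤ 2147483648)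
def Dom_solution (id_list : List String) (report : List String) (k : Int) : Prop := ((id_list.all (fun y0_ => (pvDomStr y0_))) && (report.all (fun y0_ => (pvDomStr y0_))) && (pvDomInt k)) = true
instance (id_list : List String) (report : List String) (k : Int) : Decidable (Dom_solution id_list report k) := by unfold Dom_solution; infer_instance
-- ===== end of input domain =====

-- B replaces A's two hash maps (ban counter + per-reporter adjacency lists with a
-- nested counting loop) by sort-and-sweep: sort the deduplicated reports by
-- reportee, sweep the contiguous groups once, and read answers off the emitted
-- reporter list (objective: alternative).

-- shared helper: x, y = rep.split(" ")  (both Pythons destructure the same split)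
def pySplit2 (rep : String) : String × String :=
  let parts := (PySem.Str.split? rep " ").getD []
  (parts.getD 0 "", parts.getD 1 "")

-- ===== PORT A =====
def solution (id_list : List String) (report : List String) (k : Int) : List Int :=
  let report' : List String := PySem.Set.ofList report
  let rd : PySem.Dict String Int × PySem.Dict String (List String) :=
    report'.foldl (fun s rep =>
      let x := (pySplit2 rep).1
      let y := (pySplit2 rep).2
      -- if y not in r_dic: r_dic[y] = 1 else: r_dic[y] += 1
      let r := if s.1.contains y = false then s.1.insert y 1 else s.1.modify y 0 (· + 1)
      -- u_dic[x] += [y]   (defaultdict(list))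
      let u := s.2.modify x [] (fun l => l ++ [y])
      (r, u)) (PySem.Dict.empty, PySem.Dict.empty)
  let r_dic := rd.1
  let u_dic := rd.2
  -- r_dic[v] is only read at keys v that were stored, so getD v 0 is exact under Pre_
  id_list.foldl (fun answer u_id =>
    let cnt := (u_dic.getD u_id []).foldl (fun cnt v => if r_dic.getD v 0 ≥ k then cnt + 1 else cnt) 0
    answer ++ [cnt]) []

-- ===== PORT B =====
-- inner while loop: j = length of the leading run of pairs whose reportee is y
def grpLen (y : String) : List (String × String) → Nat
  | [] => 0
  | p :: rest => if p.1 == y then grpLen y rest + 1 else 0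

-- outer while loop over the sorted pairs: emit the reporters of groups of size ≥ k
def sweep (k : Int) (l : List (String × String)) : List String :=
  match l with
  | [] => []
  | p :: t =>
    let j := grpLen p.1 (p :: t)
    (if (j : Int) ≥ k then ((p :: t).take j).map (·.2) else []) ++ sweep k ((p :: t).drop j)
  termination_by l.length
  decreasing_by simp [grpLen, List.length_drop]

def solution_alt (id_list : List String) (report : List String) (k : Int) : List Int :=
  let pairs : List (String × String) :=
    (PySem.Set.ofList report).foldl
      (fun acc r => acc ++ [((pySplit2 r).2, (pySplit2 r).1)]) []
  let sorted := PySem.List.sorted pairs (·.1)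
  let mails := sweep k sorted
  id_list.map (fun u => ((mails.count u : Nat) : Int))

-- ===== PRECONDITION & SPEC =====
-- Pre_ excludes reports that do not split on " " into exactly two tokens: there
-- `x, y = rep.split(" ")` raises ValueError in A (B raises there too).
def Pre_solution (_id_list : List String) (report : List String) (_k : Int) : Prop :=
  ∀ rep ∈ report, ((PySem.Str.split? rep " ").getD []).length = 2
instance (id_list : List String) (report : List String) (k : Int) : Decidable (Pre_solution id_list report k) := by unfold Pre_solution; infer_instance
def pvWitness_solution : List String × List String × Int :=
  (["muzi", "frodo", "apeach", "neo"],
   ["muzi frodo", "apeach frodo", "frodo neo", "muzi neo", "apeach muzi", "muzi frodo"], 2)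
def Spec_solution (id_list : List String) (report : List String) (k : Int) (out : List Int) : Prop := out = solution_alt id_list report k
instance (id_list : List String) (report : List String) (k : Int) (out : List Int) : Decidable (Spec_solution id_list report k out) := by unfold Spec_solution; infer_instance

-- ===== CLAIM (what is proved, stated in full; the proofs are below) =====
def Claim_equal_solution : Prop := ∀ (id_list : List String) (report : List String) (k : Int), Dom_solution id_list report k → Pre_solution id_list report k → Spec_solution id_list report k (solution id_list report k)

-- ===== LEMMAS AND PROOFS =====
-- A's conditional counting update is exactly Counter's update
lemma rStep_eq_modify (d : PySem.Dict String Int) (y : String) :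
    (if d.contains y = false then d.insert y 1 else d.modify y 0 (· + 1)) = d.modify y 0 (· + 1) := by
  by_cases h : d.contains y = false
  · simp only [h, if_true, PySem.Dict.modify, PySem.Dict.getD, PySem.Dict.get?]
    have : List.find? (fun p => p.1 == y) d.items = none := by
      rw [List.find?_eq_none]
      intro p hp
      simp only [PySem.Dict.contains, List.any_eq_false] at h
      exact h p hp
    simp [this]
  · simp [h]

-- the u_dic loop stores, per reporter, the reportees in pass order
lemma uFold_getD (P : List (String × String)) (d : PySem.Dict String (List String)) (i : String) :
    (P.foldl (fun d p => d.modify p.1 [] (fun l => l ++ [p.2])) d).getD i []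
      = d.getD i [] ++ (P.filter (fun p => p.1 == i)).map (·.2) := by
  induction P generalizing d with
  | nil => simp
  | cons p P ih =>
    simp only [List.foldl_cons, ih, List.filter_cons]
    by_cases h : p.1 = i
    · subst h; simp [PySem.Dict.getD_modify_self]
    · rw [PySem.Dict.getD_modify_of_ne _ [] _ (fun heq => h heq.symm)]
      simp [h]

-- grpLen counts the leading run: take/drop at grpLen are takeWhile/dropWhile
lemma take_grpLen (y : String) (l : List (String × String)) :
    l.take (grpLen y l) = l.takeWhile (fun p => p.1 == y) := by
  induction l with
  | nil => rfl
  | cons p t ih =>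
    simp only [grpLen, List.takeWhile_cons]
    by_cases h : p.1 = y <;> simp [h, ih]

lemma drop_grpLen (y : String) (l : List (String × String)) :
    l.drop (grpLen y l) = l.dropWhile (fun p => p.1 == y) := by
  induction l with
  | nil => rfl
  | cons p t ih =>
    simp only [grpLen, List.dropWhile_cons]
    by_cases h : p.1 = y <;> simp [h, ih]

lemma grpLen_eq_length_takeWhile (y : String) (l : List (String × String)) :
    grpLen y l = (l.takeWhile (fun p => p.1 == y)).length := by
  induction l with
  | nil => rfl
  | cons p t ih =>
    simp only [grpLen, List.takeWhile_cons]
    by_cases h : p.1 = y <;> simp [h, ih]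

-- a key only in the leading run: later (sorted) elements never repeat it
lemma dropWhile_key_ne (y : String) (l : List (String × String))
    (hpw : l.Pairwise (fun a b => a.1 ≤ b.1)) (hle : ∀ q ∈ l, y ≤ q.1) :
    ∀ q ∈ l.dropWhile (fun p => p.1 == y), q.1 ≠ y := by
  induction l with
  | nil => simp
  | cons p t ih =>
    rw [List.dropWhile_cons]
    by_cases h : p.1 = y
    · simp only [h, BEq.rfl, if_true]
      exact ih hpw.tail (fun q hq => hle q (List.mem_cons_of_mem p hq))
    · have hb : (p.1 == y) = false := by simp [h]
      simp only [hb, Bool.false_eq_true, if_false]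
      intro q hq
      rcases List.mem_cons.mp hq with rfl | hq'
      · exact h
      · have h1 : y ≤ p.1 := hle p (List.mem_cons_self)
        have h2 : p.1 ≤ q.1 := (List.pairwise_cons.mp hpw).1 q hq'
        intro hqy
        exact h (le_antisymm (hqy ▸ h2) h1)

-- THE sweep characterisation: counting a reporter in sweep's output = the banned-pair count
lemma take_len_takeWhile (y : String) (l : List (String × String)) :
    l.take ((l.takeWhile (fun p => p.1 == y)).length) = l.takeWhile (fun p => p.1 == y) := by
  rw [← grpLen_eq_length_takeWhile, take_grpLen]

lemma drop_len_takeWhile (y : String) (l : List (String × String)) :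
    l.drop ((l.takeWhile (fun p => p.1 == y)).length) = l.dropWhile (fun p => p.1 == y) := by
  rw [← grpLen_eq_length_takeWhile, drop_grpLen]

-- THE sweep characterisation: counting a reporter in sweep's output = the banned-pair count
lemma sweep_count (k : Int) (u : String) (l : List (String × String))
    (hpw : l.Pairwise (fun a b => a.1 ≤ b.1)) :
    (sweep k l).count u
      = l.countP (fun p => decide ((l.countP (fun q => q.1 == p.1) : Int) ≥ k) && (p.2 == u)) := by
  induction l using sweep.induct with
  | case1 => simp [sweep]
  | case2 p t j ih =>
    have hdrop : List.drop j (p :: t) = (p :: t).dropWhile (fun q => q.1 == p.1) :=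
      drop_grpLen p.1 (p :: t)
    rw [hdrop] at ih
    simp only [sweep, grpLen_eq_length_takeWhile, take_len_takeWhile, drop_len_takeWhile]
    set g : List (String × String) := (p :: t).takeWhile (fun q => q.1 == p.1) with hgdef
    set r : List (String × String) := (p :: t).dropWhile (fun q => q.1 == p.1) with hrdef
    have hgr : g ++ r = p :: t := List.takeWhile_append_dropWhile
    have hg : ∀ q ∈ g, q.1 = p.1 := fun q hq => by
      have := List.mem_takeWhile_imp hq; exact eq_of_beq this
    have hle : ∀ q ∈ (p :: t), p.1 ≤ q.1 := by
      intro q hq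
      rcases List.mem_cons.mp hq with rfl | hq'
      · exact le_refl _
      · exact (List.pairwise_cons.mp hpw).1 q hq'
    have hrne : ∀ q ∈ r, q.1 ≠ p.1 := dropWhile_key_ne p.1 (p :: t) hpw hle
    have hpwr : r.Pairwise (fun a b => a.1 ≤ b.1) :=
      List.Pairwise.sublist (List.dropWhile_sublist _) hpw
    have hcnt_p : (p :: t).countP (fun q => q.1 == p.1) = g.length := by
      rw [← hgr, List.countP_append,
        List.countP_eq_length.mpr (fun q hq => by simp [hg q hq]),
        List.countP_eq_zero.mpr (fun q hq => by simp [hrne q hq])]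
      omega
    have hcnt_r : ∀ q ∈ r, (p :: t).countP (fun w => w.1 == q.1) = r.countP (fun w => w.1 == q.1) := by
      intro q hq
      rw [← hgr, List.countP_append,
        List.countP_eq_zero.mpr (fun w hw => by simp [hg w hw, Ne.symm (hrne q hq)])]
      simp
    rw [List.count_append]
    have hmap : (g.map (fun q => q.2)).count u = g.countP (fun q => q.2 == u) := by
      rw [List.count_eq_countP, List.countP_map]; rfl
    have hrhs : (p :: t).countP (fun q => decide (((p :: t).countP (fun w => w.1 == q.1) : Int) ≥ k) && (q.2 == u))
        = g.countP (fun q => decide (((g.length : Nat) : Int) ≥ k) && (q.2 == u))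
          + r.countP (fun q => decide ((r.countP (fun w => w.1 == q.1) : Int) ≥ k) && (q.2 == u)) := by
      conv_lhs => rw [← hgr]
      rw [List.countP_append]
      congr 1
      · refine List.countP_congr (fun q hq => ?_)
        have h1 : q.1 = p.1 := hg q hq
        rw [h1, hgr, hcnt_p]
      · refine List.countP_congr (fun q hq => ?_)
        rw [hgr, hcnt_r q hq]
    rw [hrhs, ih hpwr]
    by_cases hk : ((g.length : Nat) : Int) ≥ k
    · rw [if_pos hk, hmap]
      congr 1
      refine (List.countP_congr (fun q _ => ?_)).symm
      simp [hk]
    · rw [if_neg hk]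
      have h0 : g.countP (fun q => decide (((g.length : Nat) : Int) ≥ k) && (q.2 == u)) = 0 :=
        List.countP_eq_zero.mpr (fun q _ => by simp [hk])
      rw [h0]
      simp

theorem solution_eq_alt (id_list report : List String) (k : Int) :
    solution id_list report k = solution_alt id_list report k := by
  simp only [solution, solution_alt]
  rw [← List.foldl_map (f := pySplit2)
      (g := fun (s : PySem.Dict String Int × PySem.Dict String (List String)) p =>
        ((if s.1.contains p.2 = false then s.1.insert p.2 1 else s.1.modify p.2 0 (· + 1)),
          s.2.modify p.1 [] (fun l => l ++ [p.2])))]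
  set P : List (String × String) := (PySem.Set.ofList report).map pySplit2 with hP
  rw [PySem.List.foldl_prod_mk
      (f := fun (d : PySem.Dict String Int) (p : String × String) =>
        if d.contains p.2 = false then d.insert p.2 1 else d.modify p.2 0 (· + 1))
      (g := fun (d : PySem.Dict String (List String)) (p : String × String) =>
        d.modify p.1 [] (fun l => l ++ [p.2]))]
  have hr : P.foldl (fun (d : PySem.Dict String Int) p =>
        if d.contains p.2 = false then d.insert p.2 1 else d.modify p.2 0 (· + 1))
        PySem.Dict.empty = PySem.Dict.counter (P.map (·.2)) := by
    rw [PySem.List.foldl_congr_mem _ _ (fun d p => d.modify p.2 0 (· + 1)) _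
        (fun acc x _ => rStep_eq_modify acc x.2)]
    rw [PySem.Dict.counter_eq_foldl]
    conv_rhs => rw [List.foldl_map]
  -- A's answer loop is a map over id_list
  rw [PySem.List.foldl_append_singleton_eq_map (f := fun u_id => _)]
  simp only [List.nil_append]
  -- B's pairs loop is a map over the deduplicated reports, i.e. P with the components swapped
  rw [PySem.List.foldl_append_singleton_eq_map
      (f := fun r => ((pySplit2 r).2, (pySplit2 r).1))]
  simp only [List.nil_append]
  have hQ : (PySem.Set.ofList report).map (fun r => ((pySplit2 r).2, (pySplit2 r).1))
      = P.map (fun p => (p.2, p.1)) := by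
    rw [hP, List.map_map]; rfl
  rw [hQ]
  apply List.map_congr_left
  intro i _
  -- A side: the per-user nested loop counts banned reportees among i's reports
  rw [hr, uFold_getD, PySem.Dict.getD_empty, List.nil_append,
    PySem.List.foldl_ite_add_one (p := fun v => (PySem.Dict.counter (P.map (·.2))).getD v 0 ≥ k),
    Int.zero_add]
  simp only [PySem.Dict.getD_counter]
  rw [List.countP_map, List.countP_filter]
  -- B side: the sweep over the sorted swapped pairs counts the same pairs
  have hpw := PySem.List.sorted_pairwise (P.map (fun p => (p.2, p.1)))
      (fun q : String × String => q.1)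
  have hperm : (PySem.List.sorted (P.map (fun p => (p.2, p.1)))
      (fun q : String × String => q.1)).Perm (P.map (fun p => (p.2, p.1))) :=
    PySem.List.sorted_perm _ _ _
  have hinner : ∀ q : String × String,
      (PySem.List.sorted (P.map (fun p => (p.2, p.1))) (fun q : String × String => q.1)).countP
        (fun w => w.1 == q.1)
      = List.count q.1 (P.map (·.2)) := by
    intro q
    rw [hperm.countP_eq]
    simp only [List.countP_map, List.count_eq_countP, Function.comp_def]
  have hB : (sweep k (PySem.List.sorted (P.map (fun p => (p.2, p.1)))
        (fun q : String × String => q.1))).count i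
      = P.countP (fun p => decide ((List.count p.2 (P.map (·.2)) : Int) ≥ k) && (p.1 == i)) := by
    rw [sweep_count k i _ hpw]
    rw [List.countP_congr (q := fun q =>
        decide ((List.count q.1 (P.map (·.2)) : Int) ≥ k) && (q.2 == i))
      (fun q _ => by rw [hinner q])]
    rw [hperm.countP_eq, List.countP_map]
    apply List.countP_congr
    intro q _
    simp
  rw [hB]
  simp only [Function.comp_def]

-- ===== VERDICT (by name: the statement is the Claim_ definition above) =====
theorem solution_spec : Claim_equal_solution := by
  intro id_list report k _ _
  unfold Spec_solution
  exact solution_eq_alt id_list report k
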